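-- pv_equiv track=rewrite | github.com/xiaohuanlin/Algorithms | Leetcode/2250. Count Number of Rectangles Containing Each Point.py | countRectangles
-- ===== SOURCE A (Python) =====
-- from typing import List
--
-- import bisect
--
-- def countRectangles(rectangles: List[List[int]], points: List[List[int]]) -> List[int]:
--     maps = [[] for i in range(101)]
--     for x, y in rectangles:
--         maps[y].append(x)
--
--     for i in range(len(maps)):
--         maps[i].sort()
--
--     res = []
--     for x, y in points:
--         tmp = 0
--         for i in range(y, 101):
--             if maps[i]:
--                 x_bigger = bisect.bisect_left(maps[i], x)
--                 tmp += (len(maps[i]) - x_bigger)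
--         res.append(tmp)
--     return res
-- ===== SOURCE B (Python) =====
-- def countRectangles(rectangles, points):
--     # Direct count: a rectangle [rx, ry] contains point [px, py] iff rx >= px and ry >= py.
--     return [sum(1 for rx, ry in rectangles if rx >= px and ry >= py)
--             for px, py in points]
-- ===== Notes on version B (the rewrite author's own statement) =====
-- stated objective: simpler
-- what changed: Replaces A's 101 height buckets + per-bucket sort + bisect over a height range by a single direct count of rectangles with rx >= px and ry >= py per point.
-- outside the precondition, e.g. on countRectangles([[5, -3]], [[0, 0]]): A returns [1], B returns [0]; on countRectangles([[5, 99]], [[0, -2]]): A returns [2], B returns [1]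
import Mathlib
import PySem

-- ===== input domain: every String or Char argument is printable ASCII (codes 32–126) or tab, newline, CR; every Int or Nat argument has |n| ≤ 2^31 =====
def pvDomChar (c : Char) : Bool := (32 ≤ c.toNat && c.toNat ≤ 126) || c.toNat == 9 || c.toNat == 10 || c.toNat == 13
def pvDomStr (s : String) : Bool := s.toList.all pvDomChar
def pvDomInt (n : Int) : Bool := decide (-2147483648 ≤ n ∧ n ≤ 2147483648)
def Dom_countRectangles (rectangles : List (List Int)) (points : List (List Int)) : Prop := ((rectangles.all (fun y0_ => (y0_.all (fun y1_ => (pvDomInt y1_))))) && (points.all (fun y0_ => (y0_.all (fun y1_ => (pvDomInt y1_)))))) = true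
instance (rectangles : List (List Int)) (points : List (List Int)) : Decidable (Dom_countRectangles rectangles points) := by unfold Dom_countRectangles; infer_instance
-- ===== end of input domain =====

-- B replaces A's 101 height buckets + per-bucket sort + bisect over a height range by a
-- direct per-point count of the rectangles with rx ≥ px and ry ≥ py (objective: simpler).

-- ===== PORT A =====
def countRectangles (rectangles : List (List Int)) (points : List (List Int)) : List Int :=
  -- maps = [[] for i in range(101)]
  let maps0 : List (List Int) := List.replicate 101 []
  -- for x, y in rectangles: maps[y].append(x)
  -- (non-pair rows raise ValueError and y outside 0..100 raises or wraps: excluded by Pre_,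
  --  so indexing with y.toNat is exact on the admitted inputs)
  let maps1 := rectangles.foldl (fun m r =>
    match r with
    | [x, y] => m.set y.toNat (m.getD y.toNat [] ++ [x])
    | _ => m) maps0
  -- for i in range(len(maps)): maps[i].sort()
  let maps2 := maps1.map (fun l => PySem.List.sorted l (fun e => e))
  -- res loop over points
  points.map (fun p =>
    match p with
    | [x, y] =>
      (PySem.List.pyRange y 101 1).foldl (fun tmp i =>
        let mi := maps2.getD i.toNat []   -- exact: every i in range(y,101) is ≥ 0 under Pre_
        if mi ≠ [] then
          let xBigger := PySem.List.bisectLeft mi x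
          tmp + ((mi.length : Int) - (xBigger : Int))
        else tmp) 0
    | _ => 0)

-- ===== PORT B =====
-- tuple unpacking 'for rx, ry in rectangles' / 'for px, py in points' is ported as indexing
-- the row (exact on the length-2 rows Pre_ admits); sum(1 for … if …) is countP.
def countRectangles_alt (rectangles : List (List Int)) (points : List (List Int)) : List Int :=
  points.map (fun p =>
    ((rectangles.countP (fun r =>
      decide (p.getD 0 0 ≤ r.getD 0 0) && decide (p.getD 1 0 ≤ r.getD 1 0)) : Nat) : Int))

-- ===== PRECONDITION & SPEC =====
-- Pre_ restricts to the function's natural domain (A hard-codes heights 0..100): every row is a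
-- pair; rectangle heights lie in 0..100 (outside, A raises IndexError/ValueError or — for
-- -101 ≤ y ≤ -1, where A still returns — wraps the bucket index, an accident of negative
-- indexing); point heights are ≥ 0 (for -101 ≤ py ≤ -1 A returns a double count via the same
-- wraparound; B does the natural thing there).
def Pre_countRectangles (rectangles : List (List Int)) (points : List (List Int)) : Prop :=
  (∀ r ∈ rectangles, r.length = 2 ∧ 0 ≤ PySem.List.pyGetD r 1 0 ∧ PySem.List.pyGetD r 1 0 ≤ 100) ∧
  (∀ p ∈ points, p.length = 2 ∧ 0 ≤ PySem.List.pyGetD p 1 0)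
instance (rectangles : List (List Int)) (points : List (List Int)) : Decidable (Pre_countRectangles rectangles points) := by unfold Pre_countRectangles; infer_instance

def pvWitness_countRectangles : List (List Int) × List (List Int) :=
  ([[1, 2], [2, 3], [2, 5]], [[1, 4], [2, 1], [4, 1]])

def Spec_countRectangles (rectangles : List (List Int)) (points : List (List Int)) (out : List Int) : Prop := out = countRectangles_alt rectangles points
instance (rectangles : List (List Int)) (points : List (List Int)) (out : List Int) : Decidable (Spec_countRectangles rectangles points out) := by unfold Spec_countRectangles; infer_instance

-- ===== CLAIM (what is proved, stated in full; the proofs are below) =====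
def Claim_equal_countRectangles : Prop := ∀ (rectangles : List (List Int)) (points : List (List Int)), Dom_countRectangles rectangles points → Pre_countRectangles rectangles points → Spec_countRectangles rectangles points (countRectangles rectangles points)

-- ===== LEMMAS AND PROOFS =====

-- the x-coordinates of the rectangles of height i, in input order
def pvGrp (rs : List (List Int)) (i : Int) : List Int :=
  rs.filterMap (fun r => match r with
    | [rx, ry] => if ry = i then some rx else none
    | _ => none)

theorem pvGrp_cons (rx ry : Int) (rs : List (List Int)) (i : Int) :
    pvGrp ([rx, ry] :: rs) i = (if ry = i then [rx] else []) ++ pvGrp rs i := by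
  by_cases h : ry = i <;> simp [pvGrp, h]

-- length is preserved by A's bucket-filling fold
theorem pvFold_length (rs : List (List Int)) (m : List (List Int)) :
    (rs.foldl (fun m r =>
      match r with
      | [x, y] => m.set y.toNat (m.getD y.toNat [] ++ [x])
      | _ => m) m).length = m.length := by
  induction rs generalizing m with
  | nil => rfl
  | cons r rs ih =>
    cases r with
    | nil => simpa using ih m
    | cons a t =>
      cases t with
      | nil => simpa using ih _
      | cons b t2 =>
        cases t2 with
        | nil => simpa using (ih (m.set b.toNat (m.getD b.toNat [] ++ [a])))
        | cons c t3 => simpa using ih m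

-- characterisation of A's buckets: bucket i collects the x's of height-i rectangles
theorem pvFold_getD (rs : List (List Int)) (m : List (List Int))
    (hsh : ∀ r ∈ rs, ∃ a b, r = [a, b] ∧ 0 ≤ b ∧ b ≤ 100)
    (hm : m.length = 101) (i : Int) (hi0 : 0 ≤ i) (hi1 : i < 101) :
    (rs.foldl (fun m r =>
      match r with
      | [x, y] => m.set y.toNat (m.getD y.toNat [] ++ [x])
      | _ => m) m).getD i.toNat [] = m.getD i.toNat [] ++ pvGrp rs i := by
  induction rs generalizing m with
  | nil => simp [pvGrp]
  | cons r rs ih =>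
    obtain ⟨a, b, rfl, hb0, hb1⟩ := hsh _ (List.mem_cons_self ..)
    have hrest : ∀ r ∈ rs, ∃ a b, r = [a, b] ∧ 0 ≤ b ∧ b ≤ 100 :=
      fun r hr => hsh r (List.mem_cons_of_mem _ hr)
    have hmlen : (m.set b.toNat (m.getD b.toNat [] ++ [a])).length = 101 := by
      simpa using hm
    have := ih (m.set b.toNat (m.getD b.toNat [] ++ [a])) hrest hmlen
    simp only [List.foldl_cons]
    rw [this]
    rw [pvGrp_cons]
    by_cases hbi : b = i
    · subst hbi
      have hlt : b.toNat < m.length := by omega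
      rw [List.getD_eq_getElem?_getD, List.getElem?_set_self (by omega)]
      simp
    · have hne : b.toNat ≠ i.toNat := by omega
      rw [List.getD_eq_getElem?_getD, List.getElem?_set_ne hne,
        ← List.getD_eq_getElem?_getD]
      simp [hbi]

-- on a ≤-sorted list, len − bisect_left = the number of elements ≥ x
theorem pvBisect_count (l : List Int) (x : Int)
    (hs : List.Pairwise (fun a b => a ≤ b) l) :
    (l.length : Int) - (PySem.List.bisectLeft l x : Int) = (l.countP (fun e => x ≤ e) : Int) := by
  obtain ⟨hle, hlt, hge⟩ := PySem.List.bisectLeft_spec l x hs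
  set k := PySem.List.bisectLeft l x with hk
  have : l.countP (fun e => x ≤ e) = l.length - k := by
    have hdrop : (l.drop k).countP (fun e => x ≤ e) = l.length - k := by
      rw [List.countP_eq_length.mpr]
      · simp
      · intro e he
        obtain ⟨j, hj, rfl⟩ := List.getElem_of_mem he
        have hj' : k + j < l.length := by simp at hj; omega
        have hx := hge (k + j) hj' (by omega)
        simp only [List.getElem_drop]
        simpa using hx
    have htake : (l.take k).countP (fun e => x ≤ e) = 0 := by
      rw [List.countP_eq_zero]
      intro e he
      obtain ⟨j, hj, rfl⟩ := List.getElem_of_mem he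
      simp only [List.length_take, lt_min_iff] at hj
      have := hlt j hj.2 hj.1
      simp only [List.getElem_take]
      simpa using not_le.mpr this
    calc l.countP (fun e => x ≤ e)
        = (l.take k ++ l.drop k).countP (fun e => x ≤ e) := by rw [List.take_append_drop]
      _ = l.length - k := by rw [List.countP_append, htake, hdrop]; omega
  omega

-- a 0/1 sum over a nodup list of candidate heights
theorem pvSum_indicator (R : List Int) (hnd : R.Nodup) (ry c : Int) :
    (R.map (fun i => if ry = i then c else 0)).sum = if ry ∈ R then c else 0 := by
  induction R with
  | nil => simp
  | cons a R ih =>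
    rcases List.nodup_cons.mp hnd with ⟨ha, hnd'⟩
    by_cases h : ry = a
    · subst h
      simp [ih hnd', ha]
    · simp [h, ih hnd']

-- summing the per-height counts over range(y,101) is the total count
theorem pvSum_grp (rs : List (List Int))
    (hsh : ∀ r ∈ rs, ∃ a b, r = [a, b] ∧ 0 ≤ b ∧ b ≤ 100) (x y : Int) :
    ((PySem.List.pyRange y 101 1).map
        (fun i => ((pvGrp rs i).countP (fun e => x ≤ e) : Int))).sum =
      (rs.countP (fun r =>
        match r with
        | [rx, ry] => decide (x ≤ rx) && decide (y ≤ ry)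
        | _ => false) : Int) := by
  induction rs with
  | nil => simp [pvGrp]
  | cons r rs ih =>
    obtain ⟨a, b, rfl, hb0, hb1⟩ := hsh _ (List.mem_cons_self ..)
    have hrest : ∀ r ∈ rs, ∃ a b, r = [a, b] ∧ 0 ≤ b ∧ b ≤ 100 :=
      fun r hr => hsh r (List.mem_cons_of_mem _ hr)
    have hsplit : ∀ i : Int,
        ((pvGrp ([a, b] :: rs) i).countP (fun e => x ≤ e) : Int) =
          (if b = i then (if x ≤ a then (1 : Int) else 0) else 0) +
            ((pvGrp rs i).countP (fun e => x ≤ e) : Int) := by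
      intro i
      rw [pvGrp_cons, List.countP_append]
      by_cases hbi : b = i <;> by_cases hxa : x ≤ a <;>
        simp [hbi, hxa]
    calc ((PySem.List.pyRange y 101 1).map
            (fun i => ((pvGrp ([a, b] :: rs) i).countP (fun e => x ≤ e) : Int))).sum
        = ((PySem.List.pyRange y 101 1).map
            (fun i => (if b = i then (if x ≤ a then (1 : Int) else 0) else 0) +
              ((pvGrp rs i).countP (fun e => x ≤ e) : Int))).sum := by
          congr 1; exact List.map_congr_left (fun i _ => hsplit i)
      _ = ((PySem.List.pyRange y 101 1).map
            (fun i => if b = i then (if x ≤ a then (1 : Int) else 0) else 0)).sum +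
          ((PySem.List.pyRange y 101 1).map
            (fun i => ((pvGrp rs i).countP (fun e => x ≤ e) : Int))).sum := by
          rw [← List.sum_map_add]
      _ = (if x ≤ a ∧ y ≤ b then (1 : Int) else 0) +
          (rs.countP (fun r =>
            match r with
            | [rx, ry] => decide (x ≤ rx) && decide (y ≤ ry)
            | _ => false) : Int) := by
          rw [pvSum_indicator _ (PySem.List.nodup_pyRange_one y 101), ih hrest]
          congr 1
          simp only [PySem.List.mem_pyRange_one]
          by_cases h1 : y ≤ b <;> by_cases h2 : x ≤ a <;>
            simp [h1, h2] <;> omega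
      _ = (( [a, b] :: rs).countP (fun r =>
            match r with
            | [rx, ry] => decide (x ≤ rx) && decide (y ≤ ry)
            | _ => false) : Int) := by
          by_cases h1 : y ≤ b <;> by_cases h2 : x ≤ a <;>
            simp [h1, h2] <;> omega

-- the per-point value computed by A's inner loop
theorem pvPoint_eq (rectangles : List (List Int))
    (hsh : ∀ r ∈ rectangles, ∃ a b, r = [a, b] ∧ 0 ≤ b ∧ b ≤ 100)
    (x y : Int) (hy : 0 ≤ y) :
    (PySem.List.pyRange y 101 1).foldl (fun tmp i =>
        let mi := ((rectangles.foldl (fun m r =>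
            match r with
            | [x, y] => m.set y.toNat (m.getD y.toNat [] ++ [x])
            | _ => m) (List.replicate 101 ([] : List Int))).map
              (fun l => PySem.List.sorted l (fun e => e))).getD i.toNat []
        if mi ≠ [] then
          tmp + ((mi.length : Int) - (PySem.List.bisectLeft mi x : Int))
        else tmp) 0 =
      (rectangles.countP (fun r =>
        match r with
        | [rx, ry] => decide (x ≤ rx) && decide (y ≤ ry)
        | _ => false) : Int) := by
  set maps1 := rectangles.foldl (fun m r =>
      match r with
      | [x, y] => m.set y.toNat (m.getD y.toNat [] ++ [x])
      | _ => m) (List.replicate 101 ([] : List Int)) with hmaps1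
  have hlen1 : maps1.length = 101 := by
    rw [hmaps1, pvFold_length]; simp
  -- bucket i of the sorted maps, for i in range(y,101)
  have hbucket : ∀ i : Int, 0 ≤ i → i < 101 →
      (maps1.map (fun l => PySem.List.sorted l (fun e => e))).getD i.toNat [] =
        PySem.List.sorted (pvGrp rectangles i) (fun e => e) := by
    intro i h0 h1
    have hi : i.toNat < maps1.length := by omega
    rw [List.getD_eq_getElem?_getD, List.getElem?_map, List.getElem?_eq_getElem hi]
    have hchar := pvFold_getD rectangles (List.replicate 101 ([] : List Int)) hsh (by simp) i h0 h1
    rw [← hmaps1] at hchar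
    have hrep : (List.replicate 101 ([] : List Int)).getD i.toNat [] = [] := by
      rw [List.getD_eq_getElem?_getD, List.getElem?_replicate]
      split <;> rfl
    rw [hrep, List.nil_append] at hchar
    have hge : maps1[i.toNat] = pvGrp rectangles i := by
      rw [List.getD_eq_getElem?_getD, List.getElem?_eq_getElem hi] at hchar
      simpa using hchar
    simp [hge]
  -- the body adds the count of rects of height i with x-coordinate ≥ x
  have hbody : ∀ (tmp : Int) (i : Int), i ∈ PySem.List.pyRange y 101 1 →
      (let mi := (maps1.map (fun l => PySem.List.sorted l (fun e => e))).getD i.toNat []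
       if mi ≠ [] then
         tmp + ((mi.length : Int) - (PySem.List.bisectLeft mi x : Int))
       else tmp) = tmp + ((pvGrp rectangles i).countP (fun e => x ≤ e) : Int) := by
    intro tmp i hi
    rw [PySem.List.mem_pyRange_one] at hi
    have h0 : (0:Int) ≤ i := by omega
    rw [hbucket i h0 hi.2]
    set s := PySem.List.sorted (pvGrp rectangles i) (fun e => e) with hs
    have hcnt : (s.length : Int) - (PySem.List.bisectLeft s x : Int) =
        ((pvGrp rectangles i).countP (fun e => x ≤ e) : Int) := by
      rw [pvBisect_count s x (PySem.List.sorted_pairwise _ _)]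
      congr 1
      exact (PySem.List.sorted_perm (pvGrp rectangles i) (fun e => e) false).countP_eq _
    by_cases hne : s = []
    · have hg : pvGrp rectangles i = [] := (PySem.List.sorted_eq_nil_iff _ _ _).mp hne
      simp [hne, hg]
    · simp only [hne, ne_eq, not_false_iff, if_true]
      rw [hcnt]
  rw [PySem.List.foldl_congr_mem _ _ _ _ (fun tmp i hi => hbody tmp i hi)]
  rw [PySem.List.foldl_add]
  rw [pvSum_grp rectangles hsh x y]
  simp

-- shapes from Pre_
theorem pvShape_rect (r : List Int)
    (h : r.length = 2 ∧ 0 ≤ PySem.List.pyGetD r 1 0 ∧ PySem.List.pyGetD r 1 0 ≤ 100) :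
    ∃ a b, r = [a, b] ∧ 0 ≤ b ∧ b ≤ 100 := by
  obtain ⟨hl, h0, h1⟩ := h
  match r, hl with
  | [a, b], _ =>
    refine ⟨a, b, rfl, ?_, ?_⟩ <;>
      simpa [PySem.List.pyGetD] using ‹_›

-- ===== VERDICT (by name: the statement is the Claim_ definition above) =====
theorem countRectangles_spec : Claim_equal_countRectangles := by
  intro rectangles points _ hpre
  obtain ⟨hr, hp⟩ := hpre
  show countRectangles rectangles points = countRectangles_alt rectangles points
  unfold countRectangles countRectangles_alt
  apply List.map_congr_left
  intro p hpmem
  obtain ⟨hl, hy⟩ := hp p hpmem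
  match p, hl with
  | [x, y], _ =>
    have hy' : (0:Int) ≤ y := by simpa [PySem.List.pyGetD] using hy
    have hsh : ∀ r ∈ rectangles, ∃ a b, r = [a, b] ∧ 0 ≤ b ∧ b ≤ 100 :=
      fun r hrm => pvShape_rect r (hr r hrm)
    have h2 : rectangles.countP (fun r =>
        match r with
        | [rx, ry] => decide (x ≤ rx) && decide (y ≤ ry)
        | _ => false) = rectangles.countP (fun r =>
        decide (([x, y] : List Int).getD 0 0 ≤ r.getD 0 0) &&
        decide (([x, y] : List Int).getD 1 0 ≤ r.getD 1 0)) := by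
      apply List.countP_congr
      intro r hrm
      obtain ⟨a, b, rfl, _, _⟩ := hsh r hrm
      simp
    simpa [h2] using pvPoint_eq rectangles hsh x y hy'
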